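-- pv_equiv track=rewrite | github.com/contactevin2u/orderops-api | app/ai_parse.py | guess_codes
-- ===== SOURCE A (Python) =====
-- from typing import Any, Dict, List, Optional, Tuple
--
-- def _tokens(text: str) -> List[str]:
--     sep = ",;:()[]{}|/\\-_•·—–\t"
--     t = text
--     for ch in sep:
--         t = t.replace(ch, " ")
--     return [tok for tok in t.split() if tok]
--
-- def guess_codes(text: str) -> List[str]:
--     # No regex: pick tokens with >=2 letters & >=3 digits, 4<=len<=12
--     seen, out = set(), []
--     for tok in _tokens(text):
--         letters = sum(1 for c in tok if c.isalpha())
--         digits  = sum(1 for c in tok if c.isdigit())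
--         if letters >= 2 and digits >= 3 and 4 <= len(tok) <= 12:
--             cand = tok.upper()
--             if cand not in seen:
--                 seen.add(cand); out.append(cand)
--     return out
-- ===== SOURCE B (Python) =====
-- from typing import List
--
-- def guess_codes(text: str) -> List[str]:
--     # one pass over the characters: buffer + running letter/digit counts,
--     # flush at each delimiter (separator char or whitespace); dedup against out itself
--     sep = set(",;:()[]{}|/\\-_\u2022\u00b7\u2014\u2013\t")
--     out: List[str] = []
--     buf = ""
--     letters = digits = 0
--     for c in text + " ":
--         if c in sep or c.isspace():
--             if letters >= 2 and digits >= 3 and 4 <= len(buf) <= 12: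
--                 cand = buf.upper()
--                 if cand not in out:
--                     out.append(cand)
--             buf = ""
--             letters = digits = 0
--         else:
--             buf += c
--             letters += c.isalpha()
--             digits += c.isdigit()
--     return out
-- ===== Notes on version B (the rewrite author's own statement) =====
-- stated objective: alternative
-- what changed: Replaced A's eleven whole-string replace passes followed by split() and a per-token letter/digit recount with a single pass over the characters that keeps a token buffer plus running letter/digit counts and flushes at each delimiter, deduping against the output list itself.
import Mathlib
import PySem

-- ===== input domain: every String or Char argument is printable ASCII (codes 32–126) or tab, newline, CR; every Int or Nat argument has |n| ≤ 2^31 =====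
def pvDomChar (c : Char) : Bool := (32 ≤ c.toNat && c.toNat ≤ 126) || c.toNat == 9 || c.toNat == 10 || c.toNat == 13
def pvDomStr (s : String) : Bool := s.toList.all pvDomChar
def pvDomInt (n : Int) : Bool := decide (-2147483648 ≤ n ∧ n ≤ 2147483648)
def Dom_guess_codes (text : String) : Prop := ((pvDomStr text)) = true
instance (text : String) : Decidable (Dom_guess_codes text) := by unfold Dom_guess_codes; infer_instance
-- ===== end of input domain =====

-- B replaces A's eleven whole-string replace passes + split + per-token recount with a
-- single pass over the characters (buffer + running letter/digit counts, flush at delimiters).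

-- ===== PORT A =====
-- port of _tokens: replace each separator char by a space, then split on whitespace
def guess_codes_tokens (text : String) : List String :=
  let sep : List Char := ",;:()[]{}|/\\-_•·—–\t".toList
  let t := sep.foldl (fun s ch => PySem.Str.replace s (String.ofList [ch]) " ") text
  (PySem.Str.split₀ t).filter (fun tok => tok ≠ "")

def guess_codes (text : String) : List String :=
  (List.foldl
    (fun (st : PySem.Set String × List String) tok =>
      let seen := st.1
      let out := st.2
      let letters := tok.toList.countP (fun c => PySem.Chars.isalpha c)
      let digits := tok.toList.countP (fun c => PySem.Chars.isdigit c)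
      if 2 ≤ letters ∧ 3 ≤ digits ∧ 4 ≤ PySem.Str.len tok ∧ PySem.Str.len tok ≤ 12 then
        let cand := PySem.Str.upper tok
        if ¬ seen.contains cand then (PySem.Set.add seen cand, out ++ [cand])
        else (seen, out)
      else (seen, out))
    (PySem.Set.empty, []) (guess_codes_tokens text)).2

-- ===== PORT B =====
def pvSepSet : PySem.Set Char := PySem.Set.ofList ",;:()[]{}|/\\-_•·—–\t".toList

-- the for-loop of Source B: out, buf, running letter/digit counts
def pvLoop (out : List String) (buf : List Char) (letters digits : Nat) : List Char → List String
  | [] => out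
  | c :: cs =>
    if pvSepSet.contains c || PySem.Chars.isspace c then
      let out' :=
        if 2 ≤ letters ∧ 3 ≤ digits ∧ 4 ≤ buf.length ∧ buf.length ≤ 12 then
          let cand := String.ofList (PySem.Chars.upper buf)
          if ¬ out.contains cand then out ++ [cand] else out
        else out
      pvLoop out' [] 0 0 cs
    else
      pvLoop out (buf ++ [c]) (letters + (if PySem.Chars.isalpha c then 1 else 0))
        (digits + (if PySem.Chars.isdigit c then 1 else 0)) cs

def guess_codes_alt (text : String) : List String :=
  pvLoop [] [] 0 0 (text.toList ++ [' '])

-- ===== PRECONDITION & SPEC =====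
def Spec_guess_codes (text : String) (out : List String) : Prop := out = guess_codes_alt text
instance (text : String) (out : List String) : Decidable (Spec_guess_codes text out) := by unfold Spec_guess_codes; infer_instance

-- ===== CLAIM (what is proved, stated in full; the proofs are below) =====
def Claim_equal_guess_codes : Prop := ∀ (text : String), Dom_guess_codes text → Spec_guess_codes text (guess_codes text)

-- ===== LEMMAS AND PROOFS =====
-- the separator characters, the substitution A's replace passes perform, and the delimiter test
def pvSepL : List Char := ",;:()[]{}|/\\-_•·—–\t".toList
def pvSub (c : Char) : Char := if c ∈ pvSepL then ' ' else c
def pvDelim (c : Char) : Bool := PySem.Chars.isspace c || decide (c ∈ pvSepL)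

-- the token step both A (after collapsing seen = out) and B perform, at List Char level
def pvStep (out : List String) (tok : List Char) : List String :=
  if 2 ≤ tok.countP (fun c => PySem.Chars.isalpha c) ∧ 3 ≤ tok.countP (fun c => PySem.Chars.isdigit c)
      ∧ 4 ≤ tok.length ∧ tok.length ≤ 12 then
    let cand := String.ofList (PySem.Chars.upper tok)
    if ¬ out.contains cand then out ++ [cand] else out
  else out

-- A's fold body, named (definitionally equal to the lambda in guess_codes)
def pvStepA (st : PySem.Set String × List String) (tok : String) : PySem.Set String × List String :=
  let seen := st.1
  let out := st.2
  let letters := tok.toList.countP (fun c => PySem.Chars.isalpha c)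
  let digits := tok.toList.countP (fun c => PySem.Chars.isdigit c)
  if 2 ≤ letters ∧ 3 ≤ digits ∧ 4 ≤ PySem.Str.len tok ∧ PySem.Str.len tok ≤ 12 then
    let cand := PySem.Str.upper tok
    if ¬ seen.contains cand then (PySem.Set.add seen cand, out ++ [cand])
    else (seen, out)
  else (seen, out)

theorem replace_one_go (a : Char) : ∀ (fuel : Nat) (l acc : List Char), l.length ≤ fuel →
    PySem.Chars.replace.go [a] [' '] fuel l acc
      = acc.reverse ++ l.map (fun c => if c = a then ' ' else c) := by
  intro fuel
  induction fuel with
  | zero => intro l acc h; simp at h; simp [h, PySem.Chars.replace.go]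
  | succ f ih =>
    intro l acc h
    cases l with
    | nil => simp [PySem.Chars.replace.go]
    | cons c t =>
      simp only [PySem.Chars.replace.go]
      by_cases hc : c = a
      · have hpre : List.isPrefixOf [a] (c :: t) = true := by simp [List.isPrefixOf, hc]
        rw [if_pos hpre]
        rw [ih _ _ (by simpa using Nat.le_of_succ_le_succ h)]
        simp [hc]
      · have hpre : List.isPrefixOf [a] (c :: t) = false := by
          simp [List.isPrefixOf]; exact fun h' => (hc h'.symm).elim
        rw [if_neg (by simp [hpre])]
        rw [ih _ _ (by simpa using Nat.le_of_succ_le_succ h)]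
        simp [hc]

theorem replace_one (cs : List Char) (a : Char) :
    PySem.Chars.replace cs [a] [' '] = cs.map (fun c => if c = a then ' ' else c) := by
  simp only [PySem.Chars.replace, List.isEmpty_cons, Bool.false_eq_true, if_false]
  exact replace_one_go a cs.length cs [] le_rfl

-- A's chain of replace passes is the pointwise substitution over the char list
theorem fold_replace (chs : List Char) : ∀ (s : String), ' ' ∉ chs →
    (chs.foldl (fun s ch => PySem.Str.replace s (String.ofList [ch]) " ") s).toList
      = s.toList.map (fun c => if c ∈ chs then ' ' else c) := by
  induction chs with
  | nil => intro s _; simp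
  | cons a chs ih =>
    intro s hsp
    have hspc : ' ' ∉ chs := fun h => hsp (List.mem_cons_of_mem _ h)
    rw [List.foldl_cons, ih _ hspc]
    have h1 : (PySem.Str.replace s (String.ofList [a]) " ").toList
        = s.toList.map (fun c => if c = a then ' ' else c) := by
      simp [PySem.Str.replace]
      exact replace_one _ _
    rw [h1, List.map_map]
    apply List.map_congr_left
    intro c _
    by_cases hca : c = a
    · simp [Function.comp, hca, hspc]
    · by_cases hcc : c ∈ chs <;> simp [Function.comp, hca, hcc]

-- split₀.go's accumulator is a prefix of the result
theorem split_go_acc : ∀ (cs cur : List Char) (acc : List (List Char)),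
    PySem.Chars.split₀.go cs cur acc = acc.reverse ++ PySem.Chars.split₀.go cs cur [] := by
  intro cs
  induction cs with
  | nil => intro cur acc; simp only [PySem.Chars.split₀.go]; split <;> simp
  | cons c rest ih =>
    intro cur acc
    simp only [PySem.Chars.split₀.go]
    split
    · split
      · exact ih _ _
      · rw [ih [] (cur.reverse :: acc), ih [] [cur.reverse]]
        simp
    · exact ih _ _

-- tokens produced by split₀.go are nonempty
theorem split_go_ne_nil : ∀ (cs cur : List Char) (acc : List (List Char)),
    (∀ y ∈ acc, y ≠ ([] : List Char)) →
    ∀ x ∈ PySem.Chars.split₀.go cs cur acc, x ≠ [] := by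
  intro cs
  induction cs with
  | nil =>
    intro cur acc hacc x hx
    simp only [PySem.Chars.split₀.go] at hx
    split at hx
    · exact hacc x (by simpa using hx)
    · rename_i hne
      simp at hx
      rcases hx with hx | hx
      · exact hacc x hx
      · subst hx; simp at hne ⊢; simpa using hne
  | cons c rest ih =>
    intro cur acc hacc x hx
    simp only [PySem.Chars.split₀.go] at hx
    split at hx
    · split at hx
      · exact ih _ _ hacc x hx
      · rename_i hne
        refine ih _ _ ?_ x hx
        intro y hy
        simp at hy
        rcases hy with hy | hy
        · subst hy; simp at hne ⊢; simpa using hne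
        · exact hacc y hy
    · exact ih _ _ hacc x hx

theorem sep_contains (c : Char) : (c ∈ pvSepSet) ↔ (c ∈ pvSepL) := by
  have h : pvSepSet = pvSepL := by decide
  rw [h]

theorem isspace_sub (c : Char) : PySem.Chars.isspace (pvSub c) = pvDelim c := by
  by_cases h : c ∈ pvSepL
  · have hs : PySem.Chars.isspace ' ' = true := by decide
    simp [pvSub, h, pvDelim, hs]
  · simp [pvSub, h, pvDelim]

-- the flush computation of B is pvStep on the reversed buffer
theorem flush_eq (out : List String) (cur : List Char) :
    (if 2 ≤ cur.countP (fun c => PySem.Chars.isalpha c) ∧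
        3 ≤ cur.countP (fun c => PySem.Chars.isdigit c) ∧
        4 ≤ cur.reverse.length ∧ cur.reverse.length ≤ 12 then
      (if ¬ out.contains (String.ofList (PySem.Chars.upper cur.reverse)) then
        out ++ [String.ofList (PySem.Chars.upper cur.reverse)] else out)
     else out) = pvStep out cur.reverse := by
  simp only [pvStep, List.countP_reverse]

-- the main fusion: B's single pass computes A's fold over split₀'s tokens
theorem fusion : ∀ (cs cur : List Char) (out : List String), (∀ c ∈ cur, pvDelim c = false) →
    pvLoop out cur.reverse (cur.countP (fun c => PySem.Chars.isalpha c))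
        (cur.countP (fun c => PySem.Chars.isdigit c)) (cs ++ [' '])
      = List.foldl pvStep out (PySem.Chars.split₀.go (cs.map pvSub) cur []) := by
  intro cs
  induction cs with
  | nil =>
    intro cur out _
    have hb : (pvSepSet.contains ' ' || PySem.Chars.isspace ' ') = true := by decide
    simp only [List.nil_append, pvLoop, hb, if_true]
    simp only [List.map_nil, PySem.Chars.split₀.go]
    cases cur with
    | nil => simp
    | cons a t =>
      simp only [List.isEmpty_cons, Bool.false_eq_true, if_false, List.reverse_cons,
        List.reverse_nil, List.nil_append, List.foldl_cons,
        List.foldl_nil]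
      have hfe := flush_eq out (a :: t)
      simp only [List.reverse_cons] at hfe
      rw [hfe]
  | cons c rest ih =>
    intro cur out hcur
    by_cases hd : pvDelim c = true
    · have hb : (pvSepSet.contains c || PySem.Chars.isspace c) = true := by
        have : pvSepSet.contains c = decide (c ∈ pvSepL) := by
          simp [sep_contains]
        rw [this, Bool.or_comm]; rw [pvDelim] at hd; exact hd
      have hsA : PySem.Chars.isspace (pvSub c) = true := by rw [isspace_sub]; exact hd
      simp only [List.cons_append, pvLoop, hb, if_true, List.map_cons]
      simp only [PySem.Chars.split₀.go, hsA, if_true]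
      rw [flush_eq out cur]
      cases cur with
      | nil =>
        simp only [List.isEmpty_nil, if_true]
        have h0 : pvStep out ([] : List Char).reverse = out := by simp [pvStep]
        rw [h0]
        simpa using ih [] out (by intro x hx; simp at hx)
      | cons a t =>
        simp only [List.isEmpty_cons, Bool.false_eq_true, if_false]
        rw [split_go_acc (rest.map pvSub) [] [(a :: t).reverse]]
        simp only [List.reverse_cons, List.reverse_nil, List.nil_append]
        rw [List.foldl_append]
        simp only [List.foldl_cons, List.foldl_nil]
        simpa using ih [] (pvStep out (t.reverse ++ [a])) (by intro x hx; simp at hx)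
    · have hd' : pvDelim c = false := by simpa using hd
      have hmem : c ∉ pvSepL := by
        intro hm; rw [pvDelim] at hd'; simp [hm] at hd'
      have hb : (pvSepSet.contains c || PySem.Chars.isspace c) = false := by
        have : pvSepSet.contains c = decide (c ∈ pvSepL) := by
          simp [sep_contains]
        rw [this, Bool.or_comm]; rw [pvDelim] at hd'; exact hd'
      have hsA : PySem.Chars.isspace (pvSub c) = false := by rw [isspace_sub]; exact hd'
      simp only [List.cons_append, pvLoop, hb, Bool.false_eq_true, if_false, List.map_cons]
      simp only [PySem.Chars.split₀.go, hsA, Bool.false_eq_true, if_false]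
      rw [show pvSub c = c from by simp [pvSub, hmem]]
      rw [show cur.reverse ++ [c] = (c :: cur).reverse from by simp]
      rw [show cur.countP (fun c => PySem.Chars.isalpha c) + (if PySem.Chars.isalpha c then 1 else 0)
          = (c :: cur).countP (fun c => PySem.Chars.isalpha c) from by simp [List.countP_cons]]
      rw [show cur.countP (fun c => PySem.Chars.isdigit c) + (if PySem.Chars.isdigit c then 1 else 0)
          = (c :: cur).countP (fun c => PySem.Chars.isdigit c) from by simp [List.countP_cons]]
      exact ih (c :: cur) out (by
        intro x hx
        rcases List.mem_cons.mp hx with h | h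
        · subst h; exact hd'
        · exact hcur x h)

-- A's step keeps seen and out equal, and then acts as pvStep on tok.toList
theorem stepA_diag (s : List String) (tok : String) :
    pvStepA (s, s) tok = (pvStep s tok.toList, pvStep s tok.toList) := by
  simp only [pvStepA, pvStep, PySem.Str.len_eq]
  split
  · rename_i hc
    have hc' : 2 ≤ tok.toList.countP (fun c => PySem.Chars.isalpha c) ∧
        3 ≤ tok.toList.countP (fun c => PySem.Chars.isdigit c) ∧
        4 ≤ tok.toList.length ∧ tok.toList.length ≤ 12 := by
      obtain ⟨h1, h2, h3, h4⟩ := hc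
      exact ⟨h1, h2, by exact_mod_cast h3, by exact_mod_cast h4⟩
    rw [if_pos hc']
    have hup : PySem.Str.upper tok = String.ofList (PySem.Chars.upper tok.toList) := rfl
    rw [hup]
    split
    · rename_i hni
      have hni' : String.ofList (PySem.Chars.upper tok.toList) ∉ s := by
        simpa using hni
      simp [PySem.Set.add, hni']
    · rename_i hcon
      have hcon' : String.ofList (PySem.Chars.upper tok.toList) ∈ s := by
        simpa using hcon
      simp [hcon']
  · rename_i hc
    rw [if_neg (by
      intro h
      exact hc ⟨h.1, h.2.1, by exact_mod_cast h.2.2.1, by exact_mod_cast h.2.2.2⟩)]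

theorem seen_eq_out : ∀ (toks : List String) (s : List String),
    List.foldl pvStepA (s, s) toks
      = (List.foldl (fun out tok => pvStep out tok.toList) s toks,
         List.foldl (fun out tok => pvStep out tok.toList) s toks) := by
  intro toks
  induction toks with
  | nil => intro s; simp
  | cons tok rest ih =>
    intro s
    rw [List.foldl_cons, List.foldl_cons, stepA_diag, ih]

theorem ofList_ne_empty (l : List Char) (h : l ≠ []) : String.ofList l ≠ "" := by
  intro he
  have := congrArg String.toList he
  simp at this
  exact h this

theorem sp_not_mem : ' ' ∉ pvSepL := by decide

-- A as a pvStep-fold over the char-level tokens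
theorem a_characterization (text : String) :
    guess_codes text
      = List.foldl pvStep []
          (PySem.Chars.split₀.go (text.toList.map pvSub) [] []) := by
  have hA : guess_codes text
      = (List.foldl pvStepA (PySem.Set.empty, []) (guess_codes_tokens text)).2 := rfl
  rw [hA]
  unfold guess_codes_tokens
  rw [show (",;:()[]{}|/\\-_•·—–\t".toList) = pvSepL from rfl]
  have ht : (pvSepL.foldl (fun s ch => PySem.Str.replace s (String.ofList [ch]) " ") text).toList
      = text.toList.map pvSub := by
    rw [fold_replace _ _ sp_not_mem]
    rfl
  have hsplit : PySem.Str.split₀ (pvSepL.foldl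
      (fun s ch => PySem.Str.replace s (String.ofList [ch]) " ") text)
      = (PySem.Chars.split₀.go (text.toList.map pvSub) [] []).map String.ofList := by
    simp only [PySem.Str.split₀, ht]
    rfl
  simp only [hsplit]
  have hfilter : ((PySem.Chars.split₀.go (text.toList.map pvSub) [] []).map String.ofList).filter
      (fun tok => tok ≠ "")
      = (PySem.Chars.split₀.go (text.toList.map pvSub) [] []).map String.ofList := by
    apply List.filter_eq_self.mpr
    intro a ha
    rcases List.mem_map.mp ha with ⟨l, hl, rfl⟩
    have hnil := split_go_ne_nil (text.toList.map pvSub) [] [] (by simp) l hl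
    simpa using ofList_ne_empty l hnil
  rw [hfilter]
  rw [show (PySem.Set.empty : PySem.Set String) = ([] : List String) from rfl]
  rw [seen_eq_out]
  simp only [List.foldl_map, String.toList_ofList]

-- ===== VERDICT (by name: the statement is the Claim_ definition above) =====
theorem guess_codes_spec : Claim_equal_guess_codes := by
  intro text _
  unfold Spec_guess_codes guess_codes_alt
  rw [a_characterization]
  have h := fusion text.toList [] [] (by intro c h; simp at h)
  simpa using h.symm
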